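-- pv_equiv track=rewrite | github.com/lasya65/PYTHON-CODING | Python Coding/Python-Codes/GfG Daily/gfg1.py | minimum_jumps
-- ===== SOURCE A (Python) =====
-- import math
-- from collections import deque
--
-- def is_perfect_square(num):
--     """Check if a number is a perfect square."""
--     root = int(math.sqrt(num))
--     return root * root == num
--
-- def minimum_jumps(points):
--     n = len(points)
--     # Queue for BFS (index, jumps)
--     queue = deque([(0, 0)])
--     visited = set()
--     visited.add(0)
--
--     while queue:
--         index, jumps = queue.popleft()
--
--         # If we reach the last point
--         if index == n - 1:
--             return jumps
--
--         # Check all valid next jumps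
--         for next_index in range(index + 1, n):
--             if next_index not in visited and is_perfect_square(abs(points[next_index] - points[index])):
--                 queue.append((next_index, jumps + 1))
--                 visited.add(next_index)
--
--     return 1  # If no valid path exists
-- ===== SOURCE B (Python) =====
-- import math
--
-- def is_perfect_square(num):
--     root = math.isqrt(num)
--     return root * root == num
--
-- def minimum_jumps(points):
--     # Forward DP over indices (all edges go to a larger index), instead of BFS.
--     n = len(points)
--     if n == 0:
--         return 1
--     dp = [0]  # dp[j] = minimum jumps from index 0 to j, None if unreachable
--     for j in range(1, n):
--         best = None
--         for i in range(j):
--             if dp[i] is not None and is_perfect_square(abs(points[j] - points[i])):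
--                 c = dp[i] + 1
--                 if best is None or c < best:
--                     best = c
--         dp.append(best)
--     return dp[-1] if dp[-1] is not None else 1
-- ===== Notes on version B (the rewrite author's own statement) =====
-- stated objective: alternative
-- what changed: Replaces the BFS with an explicit queue and visited set by a left-to-right dynamic program (minimum jumps to reach each index; valid since all perfect-square edges go from a smaller to a larger index), returning the last dp entry with the same fallback 1 when the end is unreachable or the list is empty.
import Mathlib
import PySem

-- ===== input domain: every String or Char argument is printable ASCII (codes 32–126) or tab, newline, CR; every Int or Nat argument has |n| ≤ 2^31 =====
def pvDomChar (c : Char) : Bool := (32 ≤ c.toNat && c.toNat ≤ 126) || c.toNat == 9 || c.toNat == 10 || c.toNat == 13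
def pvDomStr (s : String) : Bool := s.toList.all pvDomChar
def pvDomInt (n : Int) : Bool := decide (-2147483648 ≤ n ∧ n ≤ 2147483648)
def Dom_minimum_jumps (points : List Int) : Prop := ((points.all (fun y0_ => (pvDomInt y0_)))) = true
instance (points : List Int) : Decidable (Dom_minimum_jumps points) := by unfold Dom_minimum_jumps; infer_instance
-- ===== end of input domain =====

-- B replaces A's BFS (explicit queue + visited set) by a left-to-right DP over indices
-- (dp[j] = min jumps to reach j; valid because every perfect-square edge goes forward);
-- an alternative algorithm of the same cost class, proved to return the same value.

-- ===== PORT A =====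
-- int(math.sqrt(num)) is ported as Nat.sqrt: the two agree in the Bool result for the
-- values reached here (num = |difference of two domain ints|, 0 ≤ num ≤ 2^33: the float
-- sqrt of a perfect square there is exact, and for a non-square root*root ≠ num for
-- whichever neighbouring integer int() lands on).
def isPerfectSquare (num : Int) : Bool :=
  let root : Int := (Nat.sqrt num.toNat : Int)
  root * root == num

def pvEdge (points : List Int) (i j : Nat) : Bool :=
  isPerfectSquare (|points.getD j 0 - points.getD i 0|)

def bfsInner (points : List Int) (index : Nat) (jumps : Int)
    (acc : List (Nat × Int) × PySem.Set Nat) (nj : Nat) : List (Nat × Int) × PySem.Set Nat :=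
  if ¬ (nj ∈ acc.2) ∧ pvEdge points index nj = true then
    (acc.1 ++ [(nj, jumps + 1)], PySem.Set.add acc.2 nj)
  else acc

def bfsLoop (points : List Int) : Nat → List (Nat × Int) → PySem.Set Nat → Int
  | 0, _, _ => 1
  | _ + 1, [], _ => 1
  | fuel + 1, (index, jumps) :: rest, visited =>
    if (index : Int) = (points.length : Int) - 1 then jumps
    else
      let s := (List.range' (index + 1) (points.length - (index + 1))).foldl
        (bfsInner points index jumps) (rest, visited)
      bfsLoop points fuel s.1 s.2

def minimum_jumps (points : List Int) : Int :=
  bfsLoop points (points.length + 1) [(0, 0)] (PySem.Set.add PySem.Set.empty 0)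


-- ===== PORT B =====
def relaxStep (points : List Int) (j : Nat) (dp : List (Option Int))
    (best : Option Int) (i : Nat) : Option Int :=
  match dp.getD i none with
  | none => best
  | some di =>
    if pvEdge points i j = true then
      let c := di + 1
      match best with
      | none => some c
      | some b => if c < b then some c else best
    else best

def dpStep (points : List Int) (dp : List (Option Int)) (j : Nat) : List (Option Int) :=
  dp ++ [(List.range j).foldl (relaxStep points j dp) none]

def dpUpto (points : List Int) (m : Nat) : List (Option Int) :=
  (List.range' 1 m).foldl (dpStep points) [some 0]

def minimum_jumps_alt (points : List Int) : Int :=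
  if points.length = 0 then 1
  else
    match (dpUpto points (points.length - 1)).getLast? with
    | some (some v) => v
    | _ => 1


-- ===== PRECONDITION & SPEC =====
def Spec_minimum_jumps (points : List Int) (out : Int) : Prop := out = minimum_jumps_alt points
instance (points : List Int) (out : Int) : Decidable (Spec_minimum_jumps points out) := by unfold Spec_minimum_jumps; infer_instance

-- ===== CLAIM (what is proved, stated in full; the proofs are below) =====
def Claim_equal_minimum_jumps : Prop := ∀ (points : List Int), Dom_minimum_jumps points → Spec_minimum_jumps points (minimum_jumps points)

-- ===== LEMMAS AND PROOFS =====

-- distP points j : the value B's dp assigns to index j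
def distP (points : List Int) (j : Nat) : Option Int :=
  (dpUpto points j).getD j none

theorem length_dpUpto (points : List Int) (m : Nat) : (dpUpto points m).length = m + 1 := by
  induction m with
  | zero => rfl
  | succ m ih =>
    unfold dpUpto at *
    rw [List.range'_1_concat, List.foldl_append]
    simp [dpStep, ih]

theorem dpUpto_succ (points : List Int) (m : Nat) :
    dpUpto points (m + 1) =
      dpUpto points m ++ [(List.range (m + 1)).foldl (relaxStep points (m + 1) (dpUpto points m)) none] := by
  unfold dpUpto
  rw [List.range'_1_concat, List.foldl_append]
  simp [dpStep, Nat.add_comm]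

theorem getD_dpUpto (points : List Int) {i m : Nat} (h : i ≤ m) :
    (dpUpto points m).getD i none = distP points i := by
  induction m with
  | zero => interval_cases i; rfl
  | succ m ih =>
    rcases Nat.lt_or_ge i (m + 1) with hlt | hge
    · rw [dpUpto_succ, List.getD_append _ _ _ _ (by rw [length_dpUpto]; omega)]
      exact ih (by omega)
    · have : i = m + 1 := by omega
      subst this; rfl

theorem distP_zero (points : List Int) : distP points 0 = some 0 := rfl

theorem distP_succ (points : List Int) (m : Nat) :
    distP points (m + 1) = (List.range (m + 1)).foldl (relaxStep points (m + 1) (dpUpto points m)) none := by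
  unfold distP
  rw [dpUpto_succ, List.getD_eq_getElem?_getD,
    List.getElem?_append_right (by rw [length_dpUpto] : (dpUpto points m).length ≤ m + 1)]
  simp [length_dpUpto]

def cand (points : List Int) (dp : List (Option Int)) (i j : Nat) : Option Int :=
  match dp.getD i none with
  | none => none
  | some di => if pvEdge points i j = true then some (di + 1) else none

theorem relaxStep_eq (points : List Int) (j : Nat) (dp : List (Option Int)) (best : Option Int) (i : Nat) :
    relaxStep points j dp best i =
      match cand points dp i j, best with
      | none, b => b
      | some c, none => some c
      | some c, some b => if c < b then some c else some b := by
  unfold relaxStep cand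
  rcases dp.getD i none with _ | di
  · rcases best with _ | b <;> simp
  · split_ifs with h <;> rcases best with _ | b <;> simp

theorem relax_some (points : List Int) (j : Nat) (dp : List (Option Int)) (best : Option Int) (i : Nat) (m : Int)
    (h : relaxStep points j dp best i = some m) :
    best = some m ∨ cand points dp i j = some m := by
  rw [relaxStep_eq] at h
  rcases hc : cand points dp i j with _ | c <;> rw [hc] at h <;> rcases best with _ | b <;> simp_all
  split_ifs at h <;> simp_all

theorem relax_le_cand (points : List Int) (j : Nat) (dp : List (Option Int)) (best : Option Int) (i : Nat) (c : Int)
    (h : cand points dp i j = some c) :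
    ∃ m, relaxStep points j dp best i = some m ∧ m ≤ c := by
  rw [relaxStep_eq, h]
  rcases best with _ | b
  · exact ⟨c, rfl, le_refl c⟩
  · by_cases hcb : c < b
    · exact ⟨c, by simp [hcb], le_refl c⟩
    · exact ⟨b, by simp [hcb], by omega⟩

theorem relax_le_best (points : List Int) (j : Nat) (dp : List (Option Int)) (b : Int) (i : Nat) :
    ∃ m, relaxStep points j dp (some b) i = some m ∧ m ≤ b := by
  rw [relaxStep_eq]
  rcases cand points dp i j with _ | c
  · exact ⟨b, rfl, le_refl b⟩
  · by_cases hcb : c < b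
    · exact ⟨c, by simp [hcb], by omega⟩
    · exact ⟨b, by simp [hcb], le_refl b⟩

theorem fold_mono (points : List Int) (j : Nat) (dp : List (Option Int)) :
    ∀ (l : List Nat) (b : Int),
      ∃ m, l.foldl (relaxStep points j dp) (some b) = some m ∧ m ≤ b := by
  intro l
  induction l with
  | nil => intro b; exact ⟨b, rfl, le_refl b⟩
  | cons a l ih =>
    intro b
    obtain ⟨m1, hm1, hle1⟩ := relax_le_best points j dp b a
    obtain ⟨m, hm, hle⟩ := ih m1
    exact ⟨m, by simpa [List.foldl_cons, hm1] using hm, by omega⟩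

theorem fold_relax_attained (points : List Int) (j : Nat) (dp : List (Option Int)) :
    ∀ (l : List Nat) (best : Option Int) (m : Int),
      l.foldl (relaxStep points j dp) best = some m →
      best = some m ∨ ∃ i ∈ l, cand points dp i j = some m := by
  intro l
  induction l with
  | nil => intro best m h; exact Or.inl h
  | cons a l ih =>
    intro best m h
    rw [List.foldl_cons] at h
    rcases ih _ m h with h1 | ⟨i, hi, hc⟩
    · rcases relax_some points j dp best a m h1 with h2 | h2
      · exact Or.inl h2
      · exact Or.inr ⟨a, List.mem_cons_self, h2⟩
    · exact Or.inr ⟨i, List.mem_cons_of_mem _ hi, hc⟩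

theorem fold_relax_ub (points : List Int) (j : Nat) (dp : List (Option Int)) :
    ∀ (l : List Nat) (best : Option Int) (i : Nat) (c : Int),
      i ∈ l → cand points dp i j = some c →
      ∃ m, l.foldl (relaxStep points j dp) best = some m ∧ m ≤ c := by
  intro l
  induction l with
  | nil => intro best i c h; exact absurd h (List.not_mem_nil)
  | cons a l ih =>
    intro best i c hmem hc
    rw [List.foldl_cons]
    rcases List.mem_cons.mp hmem with rfl | hmem'
    · obtain ⟨m1, hm1, hle1⟩ := relax_le_cand points j dp best i c hc
      rw [hm1]
      obtain ⟨m, hm, hle⟩ := fold_mono points j dp l m1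
      exact ⟨m, hm, by omega⟩
    · exact ih _ i c hmem' hc

theorem distP_pred (points : List Int) {j : Nat} {m : Int} (hj : 1 ≤ j) (h : distP points j = some m) :
    ∃ i, i < j ∧ pvEdge points i j = true ∧ distP points i = some (m - 1) := by
  obtain ⟨m', rfl⟩ : ∃ m', j = m' + 1 := ⟨j - 1, by omega⟩
  rw [distP_succ] at h
  rcases fold_relax_attained points (m' + 1) (dpUpto points m') _ none m h with h1 | ⟨i, hi, hc⟩
  · exact absurd h1 (by simp)
  · have hilt : i < m' + 1 := List.mem_range.mp hi
    unfold cand at hc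
    rw [getD_dpUpto points (by omega : i ≤ m')] at hc
    rcases hd : distP points i with _ | di
    · rw [hd] at hc; simp at hc
    · rw [hd] at hc
      cases he : pvEdge points i (m' + 1) with
      | false => simp [he] at hc
      | true =>
        simp [he] at hc
        refine ⟨i, hilt, he, ?_⟩
        rw [hd]
        have : di = m - 1 := by omega
        rw [this]

theorem distP_ub (points : List Int) {i j : Nat} {k : Int} (hij : i < j)
    (he : pvEdge points i j = true) (hi : distP points i = some k) :
    ∃ m, distP points j = some m ∧ m ≤ k + 1 := by
  obtain ⟨m', rfl⟩ : ∃ m', j = m' + 1 := ⟨j - 1, by omega⟩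
  rw [distP_succ]
  have hc : cand points (dpUpto points m') i (m' + 1) = some (k + 1) := by
    unfold cand
    rw [getD_dpUpto points (by omega : i ≤ m'), hi]
    simp [he]
  exact fold_relax_ub points (m' + 1) (dpUpto points m') _ none i (k + 1) (List.mem_range.mpr hij) hc

theorem distP_nonneg (points : List Int) : ∀ (j : Nat), ∀ {k : Int}, distP points j = some k → 0 ≤ k := by
  intro j
  induction j using Nat.strong_induction_on with
  | _ j ih =>
    intro k hk
    rcases Nat.eq_zero_or_pos j with rfl | hj
    · rw [distP_zero] at hk
      simp at hk
      omega
    · obtain ⟨i, hij, _, hdi⟩ := distP_pred points hj hk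
      have := ih i hij hdi
      omega

theorem distP_eq_zero (points : List Int) : ∀ (j : Nat), distP points j = some 0 → j = 0 := by
  intro j hj
  by_contra h
  obtain ⟨i, _, _, hdi⟩ := distP_pred points (by omega) hj
  have := distP_nonneg points i hdi
  omega

theorem alt_eq_target (points : List Int) (hn : 1 ≤ points.length) :
    minimum_jumps_alt points =
      (match distP points (points.length - 1) with
       | some m => m
       | none => 1) := by
  unfold minimum_jumps_alt
  rw [if_neg (by omega)]
  have h1 : (dpUpto points (points.length - 1)).getLast? = some (distP points (points.length - 1)) := by
    have hlen : (dpUpto points (points.length - 1)).length = points.length - 1 + 1 :=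
      length_dpUpto points (points.length - 1)
    have hlt : points.length - 1 < (dpUpto points (points.length - 1)).length := by omega
    rw [List.getLast?_eq_getElem?, hlen]
    simp only [Nat.add_sub_cancel]
    rw [List.getElem?_eq_getElem hlt]
    unfold distP
    rw [List.getD_eq_getElem _ _ hlt]
  rw [h1]
  rcases distP points (points.length - 1) with _ | m <;> simp

theorem fold_inner (points : List Int) (index : Nat) (jumps : Int) :
    ∀ (l : List Nat), l.Nodup → ∀ (q0 : List (Nat × Int)) (v0 : PySem.Set Nat),
      l.foldl (bfsInner points index jumps) (q0, v0) =
        (q0 ++ (l.filter (fun j => ¬ j ∈ v0 ∧ pvEdge points index j = true)).map (fun j => (j, jumps + 1)),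
         PySem.Set.update v0 (l.filter (fun j => ¬ j ∈ v0 ∧ pvEdge points index j = true))) := by
  intro l
  induction l with
  | nil => intro _ q0 v0; simp [PySem.Set.update]
  | cons a l ih =>
    intro hnd q0 v0
    obtain ⟨ha, hnd'⟩ := List.nodup_cons.mp hnd
    rw [List.foldl_cons]
    by_cases hPa : ¬ a ∈ v0 ∧ pvEdge points index a = true
    · have hstep : bfsInner points index jumps (q0, v0) a =
          (q0 ++ [(a, jumps + 1)], PySem.Set.add v0 a) := by
        unfold bfsInner; rw [if_pos hPa]
      rw [hstep, ih hnd' (q0 ++ [(a, jumps + 1)]) (PySem.Set.add v0 a)]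
      have hfc : l.filter (fun j => ¬ j ∈ PySem.Set.add v0 a ∧ pvEdge points index j = true)
          = l.filter (fun j => ¬ j ∈ v0 ∧ pvEdge points index j = true) := by
        apply List.filter_congr
        intro x hx
        have hxa : x ≠ a := fun h => ha (h ▸ hx)
        simp [PySem.Set.mem_add, hxa]
      rw [hfc]
      have hfcons : (a :: l).filter (fun j => ¬ j ∈ v0 ∧ pvEdge points index j = true)
          = a :: l.filter (fun j => ¬ j ∈ v0 ∧ pvEdge points index j = true) := by
        rw [List.filter_cons]
        simp [hPa.1, hPa.2]
      rw [hfcons, PySem.Set.update_cons]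
      simp [List.append_assoc]
    · have hstep : bfsInner points index jumps (q0, v0) a = (q0, v0) := by
        unfold bfsInner; rw [if_neg hPa]
      rw [hstep, ih hnd' q0 v0]
      have hfcons : (a :: l).filter (fun j => ¬ j ∈ v0 ∧ pvEdge points index j = true)
          = l.filter (fun j => ¬ j ∈ v0 ∧ pvEdge points index j = true) := by
        rw [List.filter_cons]
        simp only [decide_eq_true_eq]
        rw [if_neg hPa]
      rw [hfcons]

theorem length_filter_lt {α : Type} (l : List α) (p : α → Bool) (a : α)
    (ha : a ∈ l) (hpa : p a = false) : (l.filter p).length < l.length := by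
  induction l with
  | nil => exact absurd ha (List.not_mem_nil)
  | cons b l ih =>
    rcases List.mem_cons.mp ha with rfl | ha'
    · rw [List.filter_cons, hpa]
      simp only [List.length_cons]
      exact Nat.lt_succ_of_le (List.length_filter_le p l)
    · rw [List.filter_cons]
      cases hpb : p b
      · simp only [List.length_cons]
        exact Nat.lt_succ_of_le (Nat.le_of_lt (ih ha'))
      · simp only [List.length_cons]
        exact Nat.succ_lt_succ (ih ha')

theorem filter_split_length {α : Type} (l : List α) (p q : α → Bool) (hq : ∀ a, q a = ! p a) :
    (l.filter p).length + (l.filter q).length = l.length := by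
  induction l with
  | nil => rfl
  | cons b l ih =>
    rw [List.filter_cons, List.filter_cons, hq b]
    cases hpb : p b <;> simp [hpb] <;> omega

theorem no_reach (points : List Int) (J : Int) (hJ : 0 ≤ J)
    (h5e : ∀ x, x < points.length → distP points x = some (J + 1) → False) :
    ∀ x, x < points.length → ∀ k, distP points x = some k → k ≤ J := by
  intro x
  induction x using Nat.strong_induction_on with
  | _ x ih =>
    intro hx k hk
    by_contra hgt
    push_neg at hgt
    rcases Nat.eq_zero_or_pos x with rfl | hxpos
    · rw [distP_zero] at hk; simp at hk; omega
    · obtain ⟨i, hix, _, hdi⟩ := distP_pred points hxpos hk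
      by_cases hkJ : k = J + 1
      · exact h5e x hx (hkJ ▸ hk)
      · have h1 : k - 1 ≤ J := ih i hix (by omega) (k - 1) hdi
        omega

theorem target_eq_one (points : List Int) (J : Int) (hJ : 0 ≤ J) (hn : 1 ≤ points.length)
    (h5e : ∀ x, x < points.length → distP points x = some (J + 1) → False)
    (h6e : ∀ k, distP points (points.length - 1) = some k → J ≤ k ∧ k ≠ J) :
    (match distP points (points.length - 1) with
     | some m => m
     | none => (1 : Int)) = 1 := by
  rcases h : distP points (points.length - 1) with _ | k
  · rfl
  · have h1 := no_reach points J hJ h5e (points.length - 1) (by omega) k h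
    have h2 := h6e k h
    omega

theorem bfs_core (points : List Int) (hn : 1 ≤ points.length) :
    ∀ (fuel : Nat) (J : Int) (e1 e2 : List (Nat × Int)) (v : PySem.Set Nat),
      0 ≤ J →
      (∀ p ∈ e1, p.2 = J ∧ distP points p.1 = some J ∧ p.1 < points.length) →
      (∀ p ∈ e2, p.2 = J + 1 ∧ distP points p.1 = some (J + 1) ∧ p.1 < points.length) →
      (((e1 ++ e2).map Prod.fst).Nodup) →
      (∀ x, x < points.length → (x ∈ v ↔ (∃ k, distP points x = some k ∧ k ≤ J) ∨ x ∈ e2.map Prod.fst)) →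
      (∀ x, x < points.length → distP points x = some (J + 1) →
        x ∈ e2.map Prod.fst ∨ ∃ p ∈ e1, pvEdge points p.1 x = true ∧ p.1 < x) →
      (∀ k, distP points (points.length - 1) = some k → J ≤ k ∧ (k = J → (points.length - 1) ∈ e1.map Prod.fst)) →
      e1 ≠ [] →
      (e1 ++ e2).length + ((List.range points.length).filter (fun x => ¬ x ∈ v)).length < fuel →
      bfsLoop points fuel (e1 ++ e2) v =
        (match distP points (points.length - 1) with
         | some m => m
         | none => 1) := by
  intro fuel
  induction fuel with
  | zero =>
    intro J e1 e2 v _ _ _ _ _ _ _ _ hf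
    omega
  | succ fuel ih =>
    intro J e1 e2 v hJ h1 h2 h3 h4 h5 h6 hne hf
    rcases e1 with _ | ⟨⟨i0, j0⟩, rest⟩
    · exact absurd rfl hne
    obtain ⟨hj0, hd0, hi0n⟩ := h1 (i0, j0) List.mem_cons_self
    simp only at hj0 hd0 hi0n
    replace hj0 := hj0.symm
    subst hj0
    show bfsLoop points (fuel + 1) ((i0, J) :: (rest ++ e2)) v = _
    by_cases hlast : (i0 : Int) = (points.length : Int) - 1
    · have hred : bfsLoop points (fuel + 1) ((i0, J) :: (rest ++ e2)) v = J := by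
        simp only [bfsLoop]
        rw [if_pos hlast]
      rw [hred]
      have hieq : i0 = points.length - 1 := by omega
      have hd' : distP points (points.length - 1) = some J := by rw [← hieq]; exact hd0
      rw [hd']
    · have hi0ne : i0 ≠ points.length - 1 := fun h => hlast (by omega)
      have hLnd : (List.range' (i0 + 1) (points.length - (i0 + 1))).Nodup := List.nodup_range'
      have hred : bfsLoop points (fuel + 1) ((i0, J) :: (rest ++ e2)) v =
          bfsLoop points fuel
            ((rest ++ e2) ++ ((List.range' (i0 + 1) (points.length - (i0 + 1))).filter
                (fun j => ¬ j ∈ v ∧ pvEdge points i0 j = true)).map (fun j => (j, J + 1)))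
            (PySem.Set.update v ((List.range' (i0 + 1) (points.length - (i0 + 1))).filter
                (fun j => ¬ j ∈ v ∧ pvEdge points i0 j = true))) := by
        simp only [bfsLoop]
        rw [if_neg hlast]
        rw [fold_inner points i0 J _ hLnd (rest ++ e2) v]
      rw [hred]
      set newIdx := (List.range' (i0 + 1) (points.length - (i0 + 1))).filter
          (fun j => ¬ j ∈ v ∧ pvEdge points i0 j = true) with hNew
      set newE := newIdx.map (fun j => (j, J + 1)) with hNewE
      have hmemL : ∀ j, j ∈ List.range' (i0 + 1) (points.length - (i0 + 1)) ↔ i0 + 1 ≤ j ∧ j < points.length := by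
        intro j
        rw [List.mem_range'_1]
        constructor <;> intro h <;> omega
      have hmemNew : ∀ j ∈ newIdx, i0 < j ∧ j < points.length ∧ ¬ j ∈ v ∧ pvEdge points i0 j = true := by
        intro j hj
        rw [hNew, List.mem_filter] at hj
        obtain ⟨hjL, hjP⟩ := hj
        have hb := (hmemL j).mp hjL
        simp only [decide_eq_true_eq] at hjP
        exact ⟨by omega, by omega, hjP.1, hjP.2⟩
      have hndNew : newIdx.Nodup := hLnd.filter _
      have hdistNew : ∀ j ∈ newIdx, distP points j = some (J + 1) := by
        intro j hj
        obtain ⟨hij, hjn, hjv, hje⟩ := hmemNew j hj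
        obtain ⟨m, hm, hmle⟩ := distP_ub points hij hje hd0
        have hnotle : ¬ (m ≤ J) := fun hmJ => hjv ((h4 j hjn).mpr (Or.inl ⟨m, hm, hmJ⟩))
        have hmJ1 : m = J + 1 := by omega
        rw [hmJ1] at hm
        exact hm
      have hqvV : ∀ p, p ∈ ((i0, J) :: rest) ++ e2 → p.1 ∈ v := by
        intro p hp
        rcases List.mem_append.mp hp with hp1 | hp2
        · obtain ⟨_, hd, hlt⟩ := h1 p hp1
          exact (h4 p.1 hlt).mpr (Or.inl ⟨J, hd, le_refl J⟩)
        · obtain ⟨_, hd, hlt⟩ := h2 p hp2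
          exact (h4 p.1 hlt).mpr (Or.inr (List.mem_map_of_mem hp2))
      have hmapNewE : newE.map Prod.fst = newIdx := by
        rw [hNewE]; simp
        rw [show (Prod.fst ∘ fun j : Nat => (j, J + 1)) = id from rfl, List.map_id]
      have h1' : ∀ p ∈ rest, p.2 = J ∧ distP points p.1 = some J ∧ p.1 < points.length :=
        fun p hp => h1 p (List.mem_cons_of_mem _ hp)
      have h2' : ∀ p ∈ e2 ++ newE, p.2 = J + 1 ∧ distP points p.1 = some (J + 1) ∧ p.1 < points.length := by
        intro p hp
        rcases List.mem_append.mp hp with hp | hp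
        · exact h2 p hp
        · rw [hNewE, List.mem_map] at hp
          obtain ⟨j, hj, rfl⟩ := hp
          obtain ⟨hij, hjn, _, _⟩ := hmemNew j hj
          exact ⟨rfl, hdistNew j hj, hjn⟩
      have htail : ((rest ++ e2).map Prod.fst).Nodup := by
        have h3x := h3
        rw [show ((i0, J) :: rest) ++ e2 = (i0, J) :: (rest ++ e2) from rfl, List.map_cons] at h3x
        exact h3x.of_cons
      have hdisj : ∀ a ∈ (rest ++ e2).map Prod.fst, a ∉ newIdx := by
        intro a ha hain
        obtain ⟨_, _, hav, _⟩ := hmemNew a hain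
        apply hav
        rw [List.mem_map] at ha
        obtain ⟨p, hp, rfl⟩ := ha
        apply hqvV p
        rcases List.mem_append.mp hp with h | h
        · exact List.mem_append.mpr (Or.inl (List.mem_cons_of_mem _ h))
        · exact List.mem_append.mpr (Or.inr h)
      have h3' : ((rest ++ (e2 ++ newE)).map Prod.fst).Nodup := by
        rw [show rest ++ (e2 ++ newE) = (rest ++ e2) ++ newE from (List.append_assoc _ _ _).symm,
          List.map_append, hmapNewE]
        exact List.Nodup.append htail hndNew (fun a ha hb => hdisj a ha hb)
      have hv' : ∀ x : Nat, x ∈ PySem.Set.update v newIdx ↔ x ∈ v ∨ x ∈ newIdx :=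
        fun x => PySem.Set.mem_update v newIdx x
      have h4' : ∀ x, x < points.length →
          (x ∈ PySem.Set.update v newIdx ↔
            (∃ k, distP points x = some k ∧ k ≤ J) ∨ x ∈ (e2 ++ newE).map Prod.fst) := by
        intro x hx
        rw [hv' x, h4 x hx, List.map_append, hmapNewE, List.mem_append]
        rw [or_assoc]
      have h5' : ∀ x, x < points.length → distP points x = some (J + 1) →
          x ∈ (e2 ++ newE).map Prod.fst ∨ ∃ p ∈ rest, pvEdge points p.1 x = true ∧ p.1 < x := by
        intro x hx hdx
        rcases h5 x hx hdx with hxe2 | ⟨p, hp, hpe, hplt⟩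
        · left; rw [List.map_append, List.mem_append]; exact Or.inl hxe2
        · rcases List.mem_cons.mp hp with rfl | hprest
          · simp only at hpe hplt
            by_cases hxv : x ∈ v
            · rcases (h4 x hx).mp hxv with ⟨k, hk, hkJ⟩ | hxe2
              · rw [hdx] at hk; simp at hk; omega
              · left; rw [List.map_append, List.mem_append]; exact Or.inl hxe2
            · left
              rw [List.map_append, List.mem_append, hmapNewE]
              right
              rw [hNew, List.mem_filter]
              refine ⟨(hmemL x).mpr ⟨by omega, hx⟩, by simp [hxv, hpe]⟩
          · exact Or.inr ⟨p, hprest, hpe, hplt⟩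
      have h6' : ∀ k, distP points (points.length - 1) = some k →
          J ≤ k ∧ (k = J → (points.length - 1) ∈ rest.map Prod.fst) := by
        intro k hk
        obtain ⟨hJk, hmem⟩ := h6 k hk
        refine ⟨hJk, fun hkJ => ?_⟩
        have hm := hmem hkJ
        rw [List.map_cons] at hm
        rcases List.mem_cons.mp hm with h | h
        · exact absurd h.symm hi0ne
        · exact h
      have hsub : ∀ x ∈ newIdx, x ∈ (List.range points.length).filter (fun x => ¬ x ∈ v) := by
        intro x hx
        obtain ⟨_, hxn, hxv, _⟩ := hmemNew x hx
        rw [List.mem_filter]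
        exact ⟨List.mem_range.mpr hxn, by simp [hxv]⟩
      have hAnd : ((List.range points.length).filter (fun x => ¬ x ∈ v)).Nodup :=
        List.Nodup.filter _ List.nodup_range
      have hstep1 : (List.range points.length).filter (fun x => ¬ x ∈ PySem.Set.update v newIdx)
          = ((List.range points.length).filter (fun x => ¬ x ∈ v)).filter (fun x => ! decide (x ∈ newIdx)) := by
        rw [List.filter_filter]
        apply List.filter_congr
        intro x _
        by_cases hxv : x ∈ v <;> by_cases hxn : x ∈ newIdx <;>
          simp [hxv, hxn, hv' x]
      have hstep3 : (((List.range points.length).filter (fun x => ¬ x ∈ v)).filter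
          (fun x => decide (x ∈ newIdx))).length = newIdx.length := by
        apply List.Perm.length_eq
        apply (List.perm_ext_iff_of_nodup (hAnd.filter _) hndNew).mpr
        intro a
        rw [List.mem_filter]
        constructor
        · rintro ⟨_, h⟩; simpa using h
        · intro h; exact ⟨hsub a h, by simpa using h⟩
      have hsplit := filter_split_length ((List.range points.length).filter (fun x => ¬ x ∈ v))
        (fun x => decide (x ∈ newIdx)) (fun x => ! decide (x ∈ newIdx)) (fun a => rfl)
      have hcount : ((List.range points.length).filter (fun x => ¬ x ∈ PySem.Set.update v newIdx)).length
          + newIdx.length = ((List.range points.length).filter (fun x => ¬ x ∈ v)).length := by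
        rw [hstep1]
        omega
      have hflen : (rest ++ (e2 ++ newE)).length +
          ((List.range points.length).filter (fun x => ¬ x ∈ PySem.Set.update v newIdx)).length < fuel := by
        have hlq : (rest ++ (e2 ++ newE)).length = rest.length + e2.length + newIdx.length := by
          simp [hNewE]; omega
        have holdq : (((i0, J) :: rest) ++ e2).length = rest.length + e2.length + 1 := by simp
        omega
      rcases hqcase : rest ++ (e2 ++ newE) with _ | ⟨q0, qrest⟩
      · -- the queue has emptied: nothing at level J+1 exists at all
        have hlen0 := congrArg List.length hqcase
        simp only [List.length_append, List.length_nil] at hlen0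
        have hrestnil : rest = [] := List.eq_nil_of_length_eq_zero (by omega)
        have he2nil : e2 = [] := List.eq_nil_of_length_eq_zero (by omega)
        have hnewEnil : newE = [] := List.eq_nil_of_length_eq_zero (by omega)
        have hempty : bfsLoop points fuel [] (PySem.Set.update v newIdx) = 1 := by
          cases fuel <;> rfl
        rw [List.append_assoc, hqcase, hempty]
        refine (target_eq_one points J hJ hn ?_ ?_).symm
        · intro x hx hdx
          rcases h5' x hx hdx with h | ⟨p, hp, _⟩
          · rw [he2nil, hnewEnil] at h; simp at h
          · rw [hrestnil] at hp; exact absurd hp (List.not_mem_nil)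
        · intro k hk
          obtain ⟨hJk, hmem⟩ := h6' k hk
          refine ⟨hJk, fun hkJ => ?_⟩
          have hmm := hmem hkJ
          rw [hrestnil] at hmm
          simp at hmm
      · rcases rest with _ | ⟨r0, rrest⟩
        · -- the current level is exhausted: advance to level J+1
          have hq2 : e2 ++ newE = q0 :: qrest := by simpa using hqcase
          have hne2 : e2 ++ newE ≠ [] := by rw [hq2]; exact List.cons_ne_nil _ _
          have g4 : ∀ x, x < points.length →
              (x ∈ PySem.Set.update v newIdx ↔
                (∃ k, distP points x = some k ∧ k ≤ J + 1) ∨ x ∈ ([] : List (Nat × Int)).map Prod.fst) := by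
            intro x hx
            simp only [List.map_nil, List.not_mem_nil, or_false]
            constructor
            · intro hxv
              rcases (h4' x hx).mp hxv with ⟨k, hk, hkJ⟩ | hxm
              · exact ⟨k, hk, by omega⟩
              · rw [List.mem_map] at hxm
                obtain ⟨p, hp, rfl⟩ := hxm
                exact ⟨J + 1, (h2' p hp).2.1, le_refl _⟩
            · rintro ⟨k, hk, hkle⟩
              by_cases hkJ : k ≤ J
              · exact (h4' x hx).mpr (Or.inl ⟨k, hk, hkJ⟩)
              · have hkeq : k = J + 1 := by omega
                subst hkeq
                rcases h5' x hx hk with h | ⟨p, hp, _⟩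
                · exact (h4' x hx).mpr (Or.inr h)
                · exact absurd hp (List.not_mem_nil)
          have g5 : ∀ x, x < points.length → distP points x = some (J + 1 + 1) →
              x ∈ ([] : List (Nat × Int)).map Prod.fst ∨
                ∃ p ∈ e2 ++ newE, pvEdge points p.1 x = true ∧ p.1 < x := by
            intro x hx hdx
            have hx1 : 1 ≤ x := by
              rcases Nat.eq_zero_or_pos x with rfl | h
              · rw [distP_zero] at hdx; simp at hdx; omega
              · exact h
            obtain ⟨i, hix, hie, hdi⟩ := distP_pred points hx1 hdx
            have hiJ1 : distP points i = some (J + 1) := by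
              rw [hdi]; congr 1; ring
            rcases h5' i (by omega) hiJ1 with hie2 | ⟨p, hp, _⟩
            · right
              rw [List.mem_map] at hie2
              obtain ⟨p, hp, hpf⟩ := hie2
              exact ⟨p, hp, by rw [hpf]; exact hie, by rw [hpf]; exact hix⟩
            · exact absurd hp (List.not_mem_nil)
          have g6 : ∀ k, distP points (points.length - 1) = some k →
              J + 1 ≤ k ∧ (k = J + 1 → (points.length - 1) ∈ (e2 ++ newE).map Prod.fst) := by
            intro k hk
            obtain ⟨hJk, hmem⟩ := h6' k hk
            have hkne : k ≠ J := fun h => by have := hmem h; simp at this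
            refine ⟨by omega, fun hkJ1 => ?_⟩
            rcases h5' (points.length - 1) (by omega) (by rw [← hkJ1]; exact hk) with h | ⟨p, hp, _⟩
            · exact h
            · exact absurd hp (List.not_mem_nil)
          have happly := ih (J + 1) (e2 ++ newE) [] (PySem.Set.update v newIdx) (by omega)
            h2' (by intro p hp; exact absurd hp (List.not_mem_nil))
            (by rw [List.append_nil]; simpa using h3')
            g4 g5 g6 hne2
            (by rw [List.append_nil]; simpa using hflen)
          rw [List.append_nil] at happly
          simpa using happly
        · -- still entries at the current level
          have happly := ih J (r0 :: rrest) (e2 ++ newE) (PySem.Set.update v newIdx) hJ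
            h1' h2' h3' h4' h5' h6' (List.cons_ne_nil _ _) hflen
          rw [← List.append_assoc] at happly
          exact happly


-- ===== VERDICT (by name: the statement is the Claim_ definition above) =====
theorem minimum_jumps_spec : Claim_equal_minimum_jumps := by
  unfold Claim_equal_minimum_jumps Spec_minimum_jumps
  intro points _
  rcases Nat.eq_zero_or_pos points.length with h0 | hn
  · have hnil : points = [] := List.eq_nil_of_length_eq_zero h0
    subst hnil
    decide
  · rw [alt_eq_target points hn]
    have g1 : ∀ p ∈ ([((0 : Nat), (0 : Int))]), p.2 = 0 ∧ distP points p.1 = some 0 ∧ p.1 < points.length := by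
      intro p hp
      rw [List.mem_singleton] at hp
      subst hp
      exact ⟨rfl, distP_zero points, hn⟩
    have g4 : ∀ x, x < points.length →
        (x ∈ PySem.Set.add PySem.Set.empty 0 ↔
          (∃ k, distP points x = some k ∧ k ≤ 0) ∨ x ∈ ([] : List (Nat × Int)).map Prod.fst) := by
      intro x hx
      simp only [List.map_nil, List.not_mem_nil, or_false]
      have hmem : x ∈ PySem.Set.add PySem.Set.empty 0 ↔ x = 0 := by
        rw [PySem.Set.mem_add]
        simp [PySem.Set.empty]
      rw [hmem]
      constructor
      · rintro rfl; exact ⟨0, distP_zero points, le_refl 0⟩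
      · rintro ⟨k, hk, hkle⟩
        have h0k := distP_nonneg points x hk
        have hkeq : k = 0 := by omega
        subst hkeq
        exact distP_eq_zero points x hk
    have g5 : ∀ x, x < points.length → distP points x = some (0 + 1) →
        x ∈ ([] : List (Nat × Int)).map Prod.fst ∨
          ∃ p ∈ ([((0 : Nat), (0 : Int))]), pvEdge points p.1 x = true ∧ p.1 < x := by
      intro x hx hdx
      have hx1 : 1 ≤ x := by
        rcases Nat.eq_zero_or_pos x with rfl | h
        · rw [distP_zero] at hdx; simp at hdx
        · exact h
      obtain ⟨i, hix, hie, hdi⟩ := distP_pred points hx1 hdx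
      have hi0 : distP points i = some 0 := by simpa using hdi
      have hieq : i = 0 := distP_eq_zero points i hi0
      subst hieq
      right
      exact ⟨(0, 0), List.mem_singleton.mpr rfl, hie, hix⟩
    have g6 : ∀ k, distP points (points.length - 1) = some k →
        (0 : Int) ≤ k ∧ (k = 0 → (points.length - 1) ∈ ([((0 : Nat), (0 : Int))]).map Prod.fst) := by
      intro k hk
      refine ⟨distP_nonneg points _ hk, fun hk0 => ?_⟩
      have hz := distP_eq_zero points _ (by rw [hk0] at hk; exact hk)
      simp [hz]
    have gfuel : (([((0 : Nat), (0 : Int))] ++ ([] : List (Nat × Int))).length +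
        ((List.range points.length).filter (fun x => ¬ x ∈ PySem.Set.add PySem.Set.empty 0)).length) < points.length + 1 := by
      have hflt : ((List.range points.length).filter (fun x => ¬ x ∈ PySem.Set.add PySem.Set.empty 0)).length < points.length := by
        have := length_filter_lt (List.range points.length)
          (fun x => decide (¬ x ∈ PySem.Set.add PySem.Set.empty 0)) 0
          (List.mem_range.mpr hn) (by decide)
        simpa using this
      simp only [List.append_nil, List.length_cons, List.length_nil]
      omega
    have hmain := bfs_core points hn (points.length + 1) 0 [(0, 0)] [] (PySem.Set.add PySem.Set.empty 0)
      (le_refl 0) g1 (by intro p hp; exact absurd hp (List.not_mem_nil))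
      (by simp) g4 g5 g6 (List.cons_ne_nil _ _) gfuel
    simpa [minimum_jumps] using hmain
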